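-- pv_equiv track=rewrite | github.com/JaweriaAsif745/LawMate | backend/nlp/risk_rules.py | detect_risk_in_clause
-- ===== SOURCE A (Python) =====
-- from typing import List, Dict
--
-- def detect_risk_in_clause(clause: str, keywords: Dict[str, List[str]]) -> List[Dict]:
--     """
--     Return a list of matches with severity and matched keyword.
--     """
--     clause_lower = clause.lower()
--     matches = []
--     for severity, words in keywords.items():
--         for w in words:
--             if w in clause_lower:
--                 matches.append({"severity": severity, "keyword": w})
--     return matches
-- ===== SOURCE B (Python) =====
-- def detect_risk_in_clause(clause, keywords):
--     """
--     Return a list of matches with severity and matched keyword.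
--     Different algorithm: index every substring of the lowered clause whose
--     length is a keyword length into a hash set once, then test each keyword
--     by a single set lookup instead of a fresh substring scan per keyword.
--     """
--     s = clause.lower()
--     lengths = {len(w) for ws in keywords.values() for w in ws}
--     subs = set()
--     for i in range(len(s) + 1):
--         for L in lengths:
--             subs.add(s[i:i + L])
--     return [{"severity": sev, "keyword": w}
--             for sev, ws in keywords.items() for w in ws if w in subs]
-- ===== Notes on version B (the rewrite author's own statement) =====
-- stated objective: alternative
-- what changed: Replaces A's per-keyword substring scan of the clause with a precomputed substring index: every slice of the lowered clause whose length is a keyword length is put in a hash set once, and each keyword is then tested by one set lookup; output list built as a comprehension in the same order.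
import Mathlib
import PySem

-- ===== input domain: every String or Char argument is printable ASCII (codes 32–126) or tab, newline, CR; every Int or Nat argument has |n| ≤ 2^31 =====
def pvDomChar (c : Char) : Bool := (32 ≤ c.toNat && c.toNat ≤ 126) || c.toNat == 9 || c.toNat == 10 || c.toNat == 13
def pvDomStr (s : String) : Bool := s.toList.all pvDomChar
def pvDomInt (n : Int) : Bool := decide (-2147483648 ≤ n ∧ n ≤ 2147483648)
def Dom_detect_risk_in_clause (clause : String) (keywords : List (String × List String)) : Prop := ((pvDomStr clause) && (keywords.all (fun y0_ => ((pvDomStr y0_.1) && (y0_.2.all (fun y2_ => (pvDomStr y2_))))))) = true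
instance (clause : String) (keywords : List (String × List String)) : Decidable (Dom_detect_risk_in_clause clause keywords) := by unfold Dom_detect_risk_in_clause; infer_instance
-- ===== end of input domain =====

-- B replaces A's per-keyword substring scans with a substring index: every slice of the
-- lowered clause whose length is a keyword length goes into a set once, and each keyword
-- is then tested by one set lookup (objective: alternative algorithm, same output).

-- ===== PORT A =====
def detect_risk_in_clause (clause : String) (keywords : List (String × List String)) : List (List (String × String)) :=
  let clause_lower := PySem.Str.lower clause
  keywords.foldl (fun acc p =>
    p.2.foldl (fun acc w =>
      if PySem.Str.isIn w clause_lower then acc ++ [[("severity", p.1), ("keyword", w)]]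
      else acc) acc) []

-- ===== PORT B =====
-- lengths = {len(w) for ws in keywords.values() for w in ws}
def pvLengths (keywords : List (String × List String)) : PySem.Set Int :=
  keywords.foldl (fun ls p => p.2.foldl (fun ls w => PySem.Set.add ls (PySem.Str.len w)) ls) PySem.Set.empty

-- subs = { s[i:i+L] for i in range(len(s)+1) for L in lengths }  (built by the two loops of Source B)
def pvSubs (s : String) (lengths : PySem.Set Int) : PySem.Set String :=
  (PySem.List.pyRange 0 (PySem.Str.len s + 1)).foldl
    (fun sb i => lengths.foldl (fun sb L => PySem.Set.add sb (PySem.Str.slice s (some i) (some (i + L)))) sb)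
    PySem.Set.empty

def detect_risk_in_clause_alt (clause : String) (keywords : List (String × List String)) : List (List (String × String)) :=
  let s := PySem.Str.lower clause
  let subs := pvSubs s (pvLengths keywords)
  keywords.flatMap (fun p =>
    (p.2.filter (fun w => PySem.Set.contains subs w)).map
      (fun w => [("severity", p.1), ("keyword", w)]))

-- ===== PRECONDITION & SPEC =====
def Spec_detect_risk_in_clause (clause : String) (keywords : List (String × List String)) (out : List (List (String × String))) : Prop := out = detect_risk_in_clause_alt clause keywords
instance (clause : String) (keywords : List (String × List String)) (out : List (List (String × String))) : Decidable (Spec_detect_risk_in_clause clause keywords out) := by unfold Spec_detect_risk_in_clause; infer_instance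

-- ===== CLAIM (what is proved, stated in full; the proofs are below) =====
def Claim_equal_detect_risk_in_clause : Prop := ∀ (clause : String) (keywords : List (String × List String)), Dom_detect_risk_in_clause clause keywords → Spec_detect_risk_in_clause clause keywords (detect_risk_in_clause clause keywords)

-- ===== LEMMAS AND PROOFS =====

-- membership in the lengths set
theorem mem_pvLengths_aux (keywords : List (String × List String)) (init : PySem.Set Int) (y : Int) :
    y ∈ keywords.foldl (fun ls p => p.2.foldl (fun ls w => PySem.Set.add ls (PySem.Str.len w)) ls) init
      ↔ y ∈ init ∨ ∃ p ∈ keywords, ∃ w ∈ p.2, y = PySem.Str.len w := by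
  induction keywords generalizing init with
  | nil => simp
  | cons p rest ih =>
    simp only [List.foldl_cons, ih, PySem.Set.mem_foldl_add, List.mem_cons]
    constructor
    · rintro ((h | ⟨w, hw, rfl⟩) | ⟨q, hq, w, hw, rfl⟩)
      · exact Or.inl h
      · exact Or.inr ⟨p, Or.inl rfl, w, hw, rfl⟩
      · exact Or.inr ⟨q, Or.inr hq, w, hw, rfl⟩
    · rintro (h | ⟨q, (rfl | hq), w, hw, rfl⟩)
      · exact Or.inl (Or.inl h)
      · exact Or.inl (Or.inr ⟨w, hw, rfl⟩)
      · exact Or.inr ⟨q, hq, w, hw, rfl⟩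

theorem mem_pvSubs_aux (s : String) (lengths : PySem.Set Int) (idxs : List Int) (init : PySem.Set String) (x : String) :
    x ∈ idxs.foldl (fun sb i => lengths.foldl (fun sb L => PySem.Set.add sb (PySem.Str.slice s (some i) (some (i + L)))) sb) init
      ↔ x ∈ init ∨ ∃ i ∈ idxs, ∃ L ∈ lengths, x = PySem.Str.slice s (some i) (some (i + L)) := by
  induction idxs generalizing init with
  | nil => simp
  | cons i rest ih =>
    simp only [List.foldl_cons, ih, PySem.Set.mem_foldl_add, List.mem_cons]
    constructor
    · rintro ((h | ⟨L, hL, rfl⟩) | ⟨j, hj, L, hL, rfl⟩)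
      · exact Or.inl h
      · exact Or.inr ⟨i, Or.inl rfl, L, hL, rfl⟩
      · exact Or.inr ⟨j, Or.inr hj, L, hL, rfl⟩
    · rintro (h | ⟨j, (rfl | hj), L, hL, rfl⟩)
      · exact Or.inl (Or.inl h)
      · exact Or.inl (Or.inr ⟨L, hL, rfl⟩)
      · exact Or.inr ⟨j, hj, L, hL, rfl⟩

-- the crux: for a word whose length is indexed, set lookup = Python substring test
theorem contains_pvSubs_eq_isIn (s w : String) (lengths : PySem.Set Int)
    (hw : PySem.Str.len w ∈ lengths)
    (hlen : ∀ L ∈ lengths, ∃ u : String, L = PySem.Str.len u) :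
    PySem.Set.contains (pvSubs s lengths) w = PySem.Str.isIn w s := by
  rw [Bool.eq_iff_iff, PySem.Set.contains_iff]
  unfold pvSubs
  rw [mem_pvSubs_aux]
  simp only [PySem.Set.empty, List.not_mem_nil, false_or]
  constructor
  · rintro ⟨i, hi, L, hL, rfl⟩
    rw [PySem.List.mem_pyRange_one] at hi
    obtain ⟨u, rfl⟩ := hlen L hL
    -- i = ↑i.toNat, len u = ↑u.toList.length
    have hi0 : (0:Int) ≤ i := hi.1
    have hlenu : PySem.Str.len u = (u.toList.length : Int) := by
      simp [PySem.Str.len_eq]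
    rw [PySem.Str.isIn_iff_infix]
    have htl : (PySem.Str.slice s (some i) (some (i + PySem.Str.len u))).toList
        = (s.toList.drop i.toNat).take u.toList.length := by
      rw [PySem.Str.toList_slice, PySem.Chars.slice_eq_listSlice]
      have : i = ((i.toNat : Nat) : Int) := by omega
      rw [this, hlenu, PySem.List.slice_natCast_add]
      simp [max_eq_left hi0]
    rw [htl]
    exact ((s.toList.drop i.toNat).take_prefix u.toList.length).isInfix.trans
      (s.toList.drop_suffix i.toNat).isInfix
  · intro hin
    rw [PySem.Str.isIn_iff_infix] at hin
    have : PySem.Chars.isIn w.toList s.toList = true := by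
      rw [PySem.Chars.isIn_iff_infix]; exact hin
    obtain ⟨j, hj⟩ := (PySem.Chars.exists_prefix_drop_iff_isIn w.toList s.toList).mpr this
    -- replace j by min j (length s)
    set n := s.toList.length with hn
    have hj' : w.toList <+: s.toList.drop (min j n) := by
      by_cases h : j ≤ n
      · simpa [min_eq_left h] using hj
      · have : s.toList.drop j = [] := by
          apply List.drop_eq_nil_of_le; omega
        rw [this] at hj
        have : w.toList = [] := List.prefix_nil.mp hj
        simp [this]
    refine ⟨((min j n : Nat) : Int), ?_, PySem.Str.len w, hw, ?_⟩
    · rw [PySem.List.mem_pyRange_one]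
      have : PySem.Str.len s = (n : Int) := by simp [PySem.Str.len_eq, hn]
      constructor
      · positivity
      · rw [this]; push_cast; omega
    · have hlenw : PySem.Str.len w = (w.toList.length : Int) := by
        simp [PySem.Str.len_eq]
      apply String.toList_inj.mp
      rw [PySem.Str.toList_slice, PySem.Chars.slice_eq_listSlice, hlenw,
        PySem.List.slice_natCast_add]
      exact (List.prefix_iff_eq_take.mp hj')

-- ===== VERDICT (by name: the statement is the Claim_ definition above) =====
set_option maxHeartbeats 1000000 in
theorem detect_risk_in_clause_spec : Claim_equal_detect_risk_in_clause := by
  intro clause keywords _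
  unfold Spec_detect_risk_in_clause detect_risk_in_clause detect_risk_in_clause_alt
  -- A: inner loop = append of filtered maps, outer loop = flatMap
  have hA : keywords.foldl (fun acc p =>
      p.2.foldl (fun acc w =>
        if PySem.Str.isIn w (PySem.Str.lower clause) then
          acc ++ [[("severity", p.1), ("keyword", w)]] else acc) acc) ([] : List (List (String × String)))
      = keywords.flatMap (fun p =>
          (p.2.filter (fun w => PySem.Str.isIn w (PySem.Str.lower clause))).map
            (fun w => [("severity", p.1), ("keyword", w)])) := by
    have hstep : (fun (acc : List (List (String × String))) (p : String × List String) =>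
        p.2.foldl (fun acc w =>
          if PySem.Str.isIn w (PySem.Str.lower clause) then
            acc ++ [[("severity", p.1), ("keyword", w)]] else acc) acc)
        = fun acc p => acc ++
            (p.2.filter (fun w => PySem.Str.isIn w (PySem.Str.lower clause))).map
              (fun w => [("severity", p.1), ("keyword", w)]) := by
      funext acc p
      exact PySem.List.foldl_append_if _ _ p.2 acc
    rw [hstep, PySem.List.foldl_append_eq_flatMap, List.nil_append]
  rw [hA]
  apply List.flatMap_congr ?_
  intro p hp
  congr 1
  apply List.filter_congr
  intro w hw
  refine (contains_pvSubs_eq_isIn (PySem.Str.lower clause) w (pvLengths keywords) ?_ ?_).symm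
  · unfold pvLengths
    rw [mem_pvLengths_aux]
    exact Or.inr ⟨p, hp, w, hw, rfl⟩
  · intro L hL
    unfold pvLengths at hL
    rw [mem_pvLengths_aux] at hL
    rcases hL with h | ⟨q, _, u, _, rfl⟩
    · simp [PySem.Set.empty] at h
    · exact ⟨u, rfl⟩
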